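-- pv_equiv track=rewrite | github.com/pypi-data/pypi-mirror-381 | packages/pytrade/pytrade-0.1.0.dev20251002160504-py3-none-any.whl/pytrade/utils/calendar.py | get_fiscal_quarters
-- ===== SOURCE A (Python) =====
-- from typing import Tuple, List, Optional, Collection
--
-- def get_fiscal_quarters(start: Tuple[int, str],
--                         end: Tuple[int, str]) -> List[Tuple[int, str]]:
--     res = []
--
--     year = start[0]
--     quarter = int(start[1][1])
--     end_year = end[0]
--     end_quarter = int(end[1][1])
--
--     while year < end_year or (year == end_year and quarter <= end_quarter):
--         res.append((year, f"Q{quarter}"))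
--         quarter += 1
--         if quarter > 4:
--             quarter = 1
--             year += 1
--
--     return res
-- ===== SOURCE B (Python) =====
-- def get_fiscal_quarters(start, end):
--     # Map both endpoints to absolute quarter indices and emit the range in one
--     # pass; modular arithmetic replaces A's explicit carry/reset branch.
--     s = start[0] * 4 + (int(start[1][1]) - 1)
--     e = end[0] * 4 + (int(end[1][1]) - 1)
--     return [(i // 4, f"Q{i % 4 + 1}") for i in range(s, e + 1)]
-- ===== Notes on version B (the rewrite author's own statement) =====
-- stated objective: simpler
-- what changed: B converts both endpoints to absolute quarter indices (year*4 + quarter-1) and builds the list in a single range comprehension with i//4 and i%4+1, eliminating A's while-loop with its quarter>4 carry/reset branch.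
import Mathlib
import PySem

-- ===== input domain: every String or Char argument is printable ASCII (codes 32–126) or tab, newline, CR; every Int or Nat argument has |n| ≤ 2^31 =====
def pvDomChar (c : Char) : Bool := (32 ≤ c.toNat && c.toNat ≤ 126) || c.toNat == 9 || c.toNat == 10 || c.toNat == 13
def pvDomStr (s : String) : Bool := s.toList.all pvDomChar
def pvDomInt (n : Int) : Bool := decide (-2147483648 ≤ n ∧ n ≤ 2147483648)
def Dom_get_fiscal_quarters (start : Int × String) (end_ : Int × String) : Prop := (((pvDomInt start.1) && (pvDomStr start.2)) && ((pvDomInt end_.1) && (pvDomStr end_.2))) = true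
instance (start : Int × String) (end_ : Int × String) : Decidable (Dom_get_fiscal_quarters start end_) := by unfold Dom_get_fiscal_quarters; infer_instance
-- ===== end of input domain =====

-- B replaces A's while-loop with carry/reset by absolute quarter indices and one
-- range pass (objective: simpler).

-- ===== PORT A =====
-- the while loop of A: state (year, quarter, res); end_year/end_quarter fixed.
-- Structural recursion on a fuel counter; the caller passes the loop's decreasing
-- measure ((end_year+1-year)*4 + (4 - min quarter 4)).toNat, which bounds the
-- number of iterations of A's while loop on every input, so the fuel never runs out.
def pvALoop : Nat → Int → Int → Int → Int → List (Int × String) → List (Int × String)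
  | 0, _, _, _, _, res => res
  | Nat.succ fuel, year, quarter, end_year, end_quarter, res =>
    if year < end_year ∨ (year = end_year ∧ quarter ≤ end_quarter) then
      if quarter + 1 > 4 then
        pvALoop fuel (year + 1) 1 end_year end_quarter
          (res ++ [(year, "Q" ++ PySem.Int.toStr quarter)])
      else
        pvALoop fuel year (quarter + 1) end_year end_quarter
          (res ++ [(year, "Q" ++ PySem.Int.toStr quarter)])
    else res

def get_fiscal_quarters (start : Int × String) (end_ : Int × String) : List (Int × String) :=
  match PySem.Str.pyGet? start.2 1, PySem.Str.pyGet? end_.2 1 with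
  | some cs, some ce =>
    match PySem.Int.ofChars? [cs], PySem.Int.ofChars? [ce] with
    | some q, some eq =>
      pvALoop ((end_.1 + 1 - start.1) * 4 + (4 - min q 4)).toNat start.1 q end_.1 eq []
    | _, _ => []          -- int() raises ValueError: outside Pre_
  | _, _ => []            -- s[1] raises IndexError: outside Pre_

-- ===== PORT B =====
def get_fiscal_quarters_alt (start : Int × String) (end_ : Int × String) : List (Int × String) :=
  match PySem.Str.pyGet? start.2 1 with
  | none => []
  | some cs =>
    match PySem.Str.pyGet? end_.2 1 with
    | none => []
    | some ce =>
      match PySem.Int.ofChars? [cs] with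
      | none => []
      | some q =>
        match PySem.Int.ofChars? [ce] with
        | none => []
        | some eq =>
          (PySem.List.pyRange (start.1 * 4 + (q - 1)) (end_.1 * 4 + (eq - 1) + 1) 1).map
            (fun i => (PySem.Int.floordiv i 4, "Q" ++ PySem.Int.toStr (PySem.Int.mod i 4 + 1)))

-- ===== PRECONDITION & SPEC =====
-- Pre_ restricts to the natural domain of fiscal-quarter labels: the second character
-- of each label is a digit '1'..'4'.  A missing/non-digit character makes A raise
-- (IndexError/ValueError); digits '0' and '5'..'9' are accepted by A but denote no
-- fiscal quarter, and A's values there (see the cited examples) are artefacts of its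
-- carry loop, so they are excluded too.
def Pre_get_fiscal_quarters (start : Int × String) (end_ : Int × String) : Prop :=
  (PySem.Str.pyGet? start.2 1 = some '1' ∨ PySem.Str.pyGet? start.2 1 = some '2' ∨
   PySem.Str.pyGet? start.2 1 = some '3' ∨ PySem.Str.pyGet? start.2 1 = some '4') ∧
  (PySem.Str.pyGet? end_.2 1 = some '1' ∨ PySem.Str.pyGet? end_.2 1 = some '2' ∨
   PySem.Str.pyGet? end_.2 1 = some '3' ∨ PySem.Str.pyGet? end_.2 1 = some '4')
instance (start : Int × String) (end_ : Int × String) : Decidable (Pre_get_fiscal_quarters start end_) := by unfold Pre_get_fiscal_quarters; infer_instance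

def pvWitness_get_fiscal_quarters : (Int × String) × (Int × String) := ((2020, "Q1"), (2021, "Q3"))

def Spec_get_fiscal_quarters (start : Int × String) (end_ : Int × String) (out : List (Int × String)) : Prop := out = get_fiscal_quarters_alt start end_
instance (start : Int × String) (end_ : Int × String) (out : List (Int × String)) : Decidable (Spec_get_fiscal_quarters start end_ out) := by unfold Spec_get_fiscal_quarters; infer_instance

-- ===== CLAIM (what is proved, stated in full; the proofs are below) =====
def Claim_equal_get_fiscal_quarters : Prop := ∀ (start : Int × String) (end_ : Int × String), Dom_get_fiscal_quarters start end_ → Pre_get_fiscal_quarters start end_ → Spec_get_fiscal_quarters start end_ (get_fiscal_quarters start end_)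

-- ===== LEMMAS AND PROOFS =====

lemma pvFloordiv_of_quarter (y q : Int) (h1 : 1 ≤ q) (h4 : q ≤ 4) :
    PySem.Int.floordiv (y * 4 + (q - 1)) 4 = y := by
  rw [PySem.Int.floordiv_eq_iff_of_pos (by omega)]; omega

lemma pvMod_of_quarter (y q : Int) (h1 : 1 ≤ q) (h4 : q ≤ 4) :
    PySem.Int.mod (y * 4 + (q - 1)) 4 = q - 1 := by
  have := PySem.Int.floordiv_mul_add_mod (y * 4 + (q - 1)) 4
  rw [pvFloordiv_of_quarter y q h1 h4] at this; omega

lemma pvALoop_eq (n : Nat) : ∀ (y q E eq : Int) (acc : List (Int × String)),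
    1 ≤ q → q ≤ 4 → 1 ≤ eq → eq ≤ 4 →
    (E * 4 + eq - (y * 4 + q - 1)).toNat ≤ n →
    pvALoop n y q E eq acc =
      acc ++ (PySem.List.pyRange (y * 4 + (q - 1)) (E * 4 + (eq - 1) + 1) 1).map
        (fun i => (PySem.Int.floordiv i 4, "Q" ++ PySem.Int.toStr (PySem.Int.mod i 4 + 1))) := by
  induction n with
  | zero =>
    intro y q E eq acc h1 h4 he1 he4 hn
    rw [PySem.List.pyRange_one_eq_nil (by omega)]
    simp [pvALoop]
  | succ n ih =>
    intro y q E eq acc h1 h4 he1 he4 hn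
    by_cases hc : y < E ∨ (y = E ∧ q ≤ eq)
    · rw [PySem.List.pyRange_one_cons (by omega)]
      have hhead :
          (PySem.Int.floordiv (y * 4 + (q - 1)) 4,
            "Q" ++ PySem.Int.toStr (PySem.Int.mod (y * 4 + (q - 1)) 4 + 1))
            = (y, "Q" ++ PySem.Int.toStr q) := by
        simp only [pvFloordiv_of_quarter y q h1 h4, pvMod_of_quarter y q h1 h4]
        norm_num
      rw [pvALoop, if_pos hc]
      by_cases hq : q + 1 > 4
      · rw [if_pos hq]
        have hq4 : q = 4 := by omega
        rw [ih (y + 1) 1 E eq (acc ++ [(y, "Q" ++ PySem.Int.toStr q)])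
          (by omega) (by omega) he1 he4 (by omega)]
        have hidx : (y + 1) * 4 + (1 - 1 : Int) = y * 4 + (q - 1) + 1 := by omega
        rw [hidx]
        simp only [List.map_cons]
        rw [hhead]
        simp
      · rw [if_neg hq]
        rw [ih y (q + 1) E eq (acc ++ [(y, "Q" ++ PySem.Int.toStr q)])
          (by omega) (by omega) he1 he4 (by omega)]
        have hidx : y * 4 + (q + 1 - 1 : Int) = y * 4 + (q - 1) + 1 := by omega
        rw [hidx]
        simp only [List.map_cons]
        rw [hhead]
        simp
    · rw [pvALoop, if_neg hc, PySem.List.pyRange_one_eq_nil (by omega)]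
      simp

lemma pvPre_elim {o : Option Char}
    (h : o = some '1' ∨ o = some '2' ∨ o = some '3' ∨ o = some '4') :
    ∃ c, o = some c ∧ (c = '1' ∨ c = '2' ∨ c = '3' ∨ c = '4') := by
  rcases h with h | h | h | h <;> exact ⟨_, h, by simp⟩

lemma pvDigit_val (c : Char) (h : c = '1' ∨ c = '2' ∨ c = '3' ∨ c = '4') :
    ∃ q : Int, PySem.Int.ofChars? [c] = some q ∧ 1 ≤ q ∧ q ≤ 4 := by
  rcases h with h | h | h | h <;> subst h
  · exact ⟨1, by decide⟩
  · exact ⟨2, by decide⟩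
  · exact ⟨3, by decide⟩
  · exact ⟨4, by decide⟩

-- ===== VERDICT (by name: the statement is the Claim_ definition above) =====
theorem get_fiscal_quarters_spec : Claim_equal_get_fiscal_quarters := by
  intro start end_ _hdom hpre
  obtain ⟨hs, he⟩ := hpre
  obtain ⟨cs, hgs, hcs⟩ := pvPre_elim hs
  obtain ⟨ce, hge, hce⟩ := pvPre_elim he
  obtain ⟨q, hq, hq1, hq4⟩ := pvDigit_val cs hcs
  obtain ⟨eq, heq, he1, he4⟩ := pvDigit_val ce hce
  unfold Spec_get_fiscal_quarters get_fiscal_quarters get_fiscal_quarters_alt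
  rw [hgs, hge]
  simp only [hq, heq]
  exact pvALoop_eq ((end_.1 + 1 - start.1) * 4 + (4 - min q 4)).toNat
    start.1 q end_.1 eq [] hq1 hq4 he1 he4 (by omega)
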